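-- pv_equiv track=rewrite | github.com/tum-vision/tandem | cva_mvsnet/models/datasets.py | generate_tuples
-- ===== SOURCE A (Python) =====
-- def generate_tuples(poses: dict, tuples_default_frame_num: int, tuples_default_frame_dist: int) -> tuple:
--     assert tuples_default_frame_num > 1
--     assert tuples_default_frame_dist > 0
--
--     min_frame_index = min(poses.keys())
--     max_frame_index = max(poses.keys())
--     frame_num = max_frame_index - min_frame_index + 1
--     spaced_frame_num = 1 + (frame_num - 1) // tuples_default_frame_dist
--     tuple_num = spaced_frame_num - tuples_default_frame_num + 1
--
--     tuples = tuple(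
--         tuple((i + j) * tuples_default_frame_dist for j in range(tuples_default_frame_num))
--         for i in range(tuple_num)
--     )
--
--     for tup in tuples:
--         for frame_index in tup:
--             assert frame_index in poses, f"For default tuples {frame_index} does not have a pose"
--
--     return tuples
-- ===== SOURCE B (Python) =====
-- def generate_tuples(poses: dict, tuples_default_frame_num: int, tuples_default_frame_dist: int) -> tuple:
--     assert tuples_default_frame_num > 1
--     assert tuples_default_frame_dist > 0
--
--     # min/max over the dict iterate its keys; raises ValueError on empty poses like A
--     lo, hi = min(poses), max(poses)
--     spaced_frame_num = 1 + (hi - lo) // tuples_default_frame_dist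
--     tuple_num = spaced_frame_num - tuples_default_frame_num + 1
--
--     # incremental sliding window: each tuple is the previous one shifted by dist
--     rows = []
--     if tuple_num > 0:
--         window = [j * tuples_default_frame_dist for j in range(tuples_default_frame_num)]
--         count = tuple_num
--         while count > 0:
--             rows.append(tuple(window))
--             window = window[1:] + [window[-1] + tuples_default_frame_dist]
--             count -= 1
--
--     for row in rows:
--         for fi in row:
--             assert fi in poses, f"For default tuples {fi} does not have a pose"
--     return tuple(rows)
-- ===== Notes on version B (the rewrite author's own statement) =====
-- stated objective: alternative
-- what changed: B builds only the first window and then derives each subsequent tuple incrementally from the previous one (drop the head, append last+dist) in a while loop, instead of A's nested generators recomputing (i+j)*dist per cell.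
import Mathlib
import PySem

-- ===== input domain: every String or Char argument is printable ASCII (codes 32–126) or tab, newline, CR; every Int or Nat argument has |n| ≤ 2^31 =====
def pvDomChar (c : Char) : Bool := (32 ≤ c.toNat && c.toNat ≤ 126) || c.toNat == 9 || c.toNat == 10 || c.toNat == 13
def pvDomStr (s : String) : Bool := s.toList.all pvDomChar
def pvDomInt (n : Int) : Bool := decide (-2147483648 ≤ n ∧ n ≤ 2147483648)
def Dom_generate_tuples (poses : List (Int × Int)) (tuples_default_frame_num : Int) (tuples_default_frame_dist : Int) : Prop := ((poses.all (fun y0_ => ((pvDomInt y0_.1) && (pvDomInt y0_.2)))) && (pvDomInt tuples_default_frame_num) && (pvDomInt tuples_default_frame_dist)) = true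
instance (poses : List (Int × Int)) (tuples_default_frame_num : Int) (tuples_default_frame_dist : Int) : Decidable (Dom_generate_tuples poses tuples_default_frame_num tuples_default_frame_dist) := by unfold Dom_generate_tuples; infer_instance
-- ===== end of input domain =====

-- B builds only the first window and derives each next tuple from the previous one (drop head, append last+dist); alternative decomposition, same cost.


-- ===== PORT A =====
-- The two asserts, 'min' on empty poses and the validation loop raise on some inputs;
-- exactly those inputs are excluded by Pre_generate_tuples, so the '.getD 0' fallbacks are never reached there.
def generate_tuples (poses : List (Int × Int)) (tuples_default_frame_num : Int) (tuples_default_frame_dist : Int) : List (List Int) :=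
  let keys := poses.map Prod.fst
  let min_frame_index := (PySem.List.min? keys (fun y => y)).getD 0
  let max_frame_index := (PySem.List.max? keys (fun y => y)).getD 0
  let frame_num := max_frame_index - min_frame_index + 1
  let spaced_frame_num := 1 + PySem.Int.floordiv (frame_num - 1) tuples_default_frame_dist
  let tuple_num := spaced_frame_num - tuples_default_frame_num + 1
  (PySem.List.pyRange 0 tuple_num 1).map (fun i =>
    (PySem.List.pyRange 0 tuples_default_frame_num 1).map (fun j => (i + j) * tuples_default_frame_dist))

-- ===== PORT B =====
-- the while loop of Source B: 'count' iterations, each emits the window and shifts it by dist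
-- (window[-1] raises in Python only on an empty window, which Pre_ rules out via num > 1;
--  the '.getD 0' is the unreachable fallback of that raise)
def genWindows (dist : Int) (window : List Int) : Nat → List (List Int)
  | 0 => []
  | count + 1 =>
      window :: genWindows dist (window.drop 1 ++ [(PySem.List.pyGet? window (-1)).getD 0 + dist]) count

def generate_tuples_alt (poses : List (Int × Int)) (tuples_default_frame_num : Int) (tuples_default_frame_dist : Int) : List (List Int) :=
  let lo := (PySem.List.min? (poses.map Prod.fst) (fun y => y)).getD 0
  let hi := (PySem.List.max? (poses.map Prod.fst) (fun y => y)).getD 0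
  let tuple_num := 1 + PySem.Int.floordiv (hi - lo) tuples_default_frame_dist - tuples_default_frame_num + 1
  if 0 < tuple_num then
    let window0 := (PySem.List.pyRange 0 tuples_default_frame_num 1).map (fun j => j * tuples_default_frame_dist)
    genWindows tuples_default_frame_dist window0 tuple_num.toNat
  else []

-- ===== PRECONDITION & SPEC =====
-- Pre_ excludes exactly the inputs on which A raises: a failing assert (num ≤ 1, dist ≤ 0,
-- or some generated frame index missing from poses) or 'min' of empty poses.
def Pre_generate_tuples (poses : List (Int × Int)) (tuples_default_frame_num : Int) (tuples_default_frame_dist : Int) : Prop :=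
  1 < tuples_default_frame_num ∧ 0 < tuples_default_frame_dist ∧ poses ≠ [] ∧
  (let keys := poses.map Prod.fst
   let mn := (PySem.List.min? keys (fun y => y)).getD 0
   let mx := (PySem.List.max? keys (fun y => y)).getD 0
   let S := 1 + PySem.Int.floordiv (mx - mn + 1 - 1) tuples_default_frame_dist
   0 < S - tuples_default_frame_num + 1 →
     ∀ k ∈ PySem.List.pyRange 0 S 1, (k * tuples_default_frame_dist) ∈ keys)
instance (poses : List (Int × Int)) (tuples_default_frame_num : Int) (tuples_default_frame_dist : Int) : Decidable (Pre_generate_tuples poses tuples_default_frame_num tuples_default_frame_dist) := by unfold Pre_generate_tuples; infer_instance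
def pvWitness_generate_tuples : (List (Int × Int)) × Int × Int := ([(0, 0), (1, 1)], 2, 1)
def Spec_generate_tuples (poses : List (Int × Int)) (tuples_default_frame_num : Int) (tuples_default_frame_dist : Int) (out : List (List Int)) : Prop := out = generate_tuples_alt poses tuples_default_frame_num tuples_default_frame_dist
instance (poses : List (Int × Int)) (tuples_default_frame_num : Int) (tuples_default_frame_dist : Int) (out : List (List Int)) : Decidable (Spec_generate_tuples poses tuples_default_frame_num tuples_default_frame_dist out) := by unfold Spec_generate_tuples; infer_instance

-- ===== CLAIM (what is proved, stated in full; the proofs are below) =====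
def Claim_equal_generate_tuples : Prop := ∀ (poses : List (Int × Int)) (tuples_default_frame_num : Int) (tuples_default_frame_dist : Int), Dom_generate_tuples poses tuples_default_frame_num tuples_default_frame_dist → Pre_generate_tuples poses tuples_default_frame_num tuples_default_frame_dist → Spec_generate_tuples poses tuples_default_frame_num tuples_default_frame_dist (generate_tuples poses tuples_default_frame_num tuples_default_frame_dist)

-- ===== LEMMAS AND PROOFS =====

-- shifting the window for offset i yields the window for offset i+1
theorem window_shift (b : Nat) (hb : 1 ≤ b) (i d : Int) :
    ((PySem.List.pyRange 0 (b : Int) 1).map (fun j => (i + j) * d)).drop 1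
      ++ [(PySem.List.pyGet? ((PySem.List.pyRange 0 (b : Int) 1).map (fun j => (i + j) * d)) (-1)).getD 0 + d]
    = (PySem.List.pyRange 0 (b : Int) 1).map (fun j => (i + 1 + j) * d) := by
  have hL : ((PySem.List.pyRange 0 (b : Int) 1).map (fun j => (i + j) * d)).length = b := by
    simp [PySem.List.length_pyRange_one]
  have hlast : (PySem.List.pyGet? ((PySem.List.pyRange 0 (b : Int) 1).map (fun j => (i + j) * d)) (-1)).getD 0
      = (i + ((b : Int) - 1)) * d := by
    rw [PySem.List.pyGet?_neg_one, List.getLast?_eq_getElem?, hL,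
      List.getElem?_eq_getElem (by rw [hL]; omega)]
    simp only [List.getElem_map, PySem.List.getElem_pyRange_one, Option.getD_some]
    have hcast : (0 : Int) + ((b - 1 : Nat) : Int) = (b : Int) - 1 := by omega
    rw [hcast]
  rw [hlast]
  apply List.ext_getElem
  · simp [PySem.List.length_pyRange_one]; omega
  · intro k h1 h2
    have hlen : (((b : Int) - 0).toNat) = b := by omega
    by_cases hk : k < b - 1
    · rw [List.getElem_append_left (by simpa [PySem.List.length_pyRange_one] using by omega)]
      simp only [List.getElem_drop, List.getElem_map, PySem.List.getElem_pyRange_one]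
      push_cast; ring
    · have hk' : k = b - 1 := by
        simp [PySem.List.length_pyRange_one] at h1; omega
      rw [List.getElem_append_right (by simp [PySem.List.length_pyRange_one]; omega)]
      simp only [List.getElem_map, PySem.List.getElem_pyRange_one]
      simp [PySem.List.length_pyRange_one, hk']
      have : ((b - 1 : Nat) : Int) = (b : Int) - 1 := by omega
      rw [this]; ring

-- the incremental loop starting at offset i produces the n windows at offsets i, i+1, …
theorem genWindows_eq (b : Nat) (hb : 1 ≤ b) (d : Int) (n : Nat) :
    ∀ i : Int, genWindows d ((PySem.List.pyRange 0 (b : Int) 1).map (fun j => (i + j) * d)) n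
      = (List.range n).map (fun k : Nat => (PySem.List.pyRange 0 (b : Int) 1).map (fun j => (i + (k : Int) + j) * d)) := by
  induction n with
  | zero => intro i; simp [genWindows]
  | succ n ih =>
      intro i
      rw [genWindows, window_shift b hb i d, ih (i + 1), List.range_succ_eq_map]
      simp only [List.map_cons, List.map_map]
      congr 1
      · apply List.map_congr_left
        intro j _
        ring
      · apply List.map_congr_left
        intro k _
        apply List.map_congr_left
        intro j _
        push_cast; ring

-- ===== VERDICT (by name: the statement is the Claim_ definition above) =====
theorem generate_tuples_spec : Claim_equal_generate_tuples := by
  intro poses num dist _ hpre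
  obtain ⟨hnum, hdist, hne, _⟩ := hpre
  unfold Spec_generate_tuples generate_tuples generate_tuples_alt
  simp only [add_sub_cancel_right]
  generalize (1 + PySem.Int.floordiv
      ((PySem.List.max? (poses.map Prod.fst) (fun y => y)).getD 0 -
        (PySem.List.min? (poses.map Prod.fst) (fun y => y)).getD 0) dist - num + 1) = T
  by_cases hT : 0 < T
  case neg =>
    rw [if_neg hT]
    have hnil : PySem.List.pyRange 0 T 1 = [] := PySem.List.pyRange_one_eq_nil (by omega)
    rw [hnil, List.map_nil]
  rw [if_pos hT]
  obtain ⟨b, rfl⟩ : ∃ b : Nat, num = (b : Int) := ⟨num.toNat, (Int.toNat_of_nonneg (by omega)).symm⟩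
  have hb : 1 ≤ b := by exact_mod_cast le_of_lt hnum
  have hw0 : (PySem.List.pyRange 0 (b : Int) 1).map (fun j => j * dist)
      = (PySem.List.pyRange 0 (b : Int) 1).map (fun j => ((0 : Int) + j) * dist) := by
    apply List.map_congr_left; intro j _; ring
  rw [hw0, genWindows_eq b hb dist T.toNat 0]
  apply List.ext_getElem
  · simp [PySem.List.length_pyRange_one]
  · intro k h1 h2
    simp only [List.getElem_map, PySem.List.getElem_pyRange_one, List.getElem_range]
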